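-- pv_equiv track=rewrite | github.com/wyu19/NBA_Stats | Main.py | sort_allstats
-- ===== SOURCE A (Python) =====
-- def sort_allstats(stats, stat_indices):
--     s = []
--     counter = 0
--     for i in stats:
--         if counter == 16:
--             counter = 0
--         if counter in stat_indices:
--             s.append(i)
--         counter += 1
--     return s
-- ===== SOURCE B (Python) =====
-- def sort_allstats(stats, stat_indices):
--     if not stats:
--         return []
--     picked = [x for j, x in enumerate(stats[:16]) if j in stat_indices]
--     return picked + sort_allstats(stats[16:], stat_indices)
-- ===== Notes on version B (the rewrite author's own statement) =====
-- stated objective: alternative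
-- what changed: Replaced the flat scan with a reset-at-16 counter by recursion on 16-element chunks: each chunk is sliced off, its kept columns selected by an enumerate-comprehension, and the function recurses on the rest.
import Mathlib
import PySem

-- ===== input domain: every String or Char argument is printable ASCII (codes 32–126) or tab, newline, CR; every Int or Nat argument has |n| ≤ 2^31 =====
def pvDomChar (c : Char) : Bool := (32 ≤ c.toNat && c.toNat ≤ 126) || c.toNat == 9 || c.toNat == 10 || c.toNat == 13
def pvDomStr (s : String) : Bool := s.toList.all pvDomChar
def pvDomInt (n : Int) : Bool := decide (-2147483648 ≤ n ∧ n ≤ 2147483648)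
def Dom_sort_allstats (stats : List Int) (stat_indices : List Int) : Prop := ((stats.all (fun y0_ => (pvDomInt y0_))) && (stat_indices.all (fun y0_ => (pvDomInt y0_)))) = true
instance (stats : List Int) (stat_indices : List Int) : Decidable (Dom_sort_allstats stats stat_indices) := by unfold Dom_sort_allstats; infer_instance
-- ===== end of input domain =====

-- B replaces A's flat counter-reset scan by recursion on 16-element chunks (slice off a
-- chunk, select its kept columns via enumerate, recurse on the rest); same cost, alternative structure.

-- ===== PORT A =====
def sort_allstats (stats : List Int) (stat_indices : List Int) : List Int :=
  (stats.foldl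
    (fun (st : List Int × Int) i =>
      let counter := if st.2 = 16 then 0 else st.2
      ((if counter ∈ stat_indices then st.1 ++ [i] else st.1), counter + 1))
    ([], 0)).1

-- ===== PORT B =====
-- structural recursion on a fuel = stats.length bound (the fuel only makes the
-- 16-element-slice recursion structural; the 0-fuel branch is unreachable)
def sortAllstatsGo (fuel : Nat) (stats : List Int) (stat_indices : List Int) : List Int :=
  match fuel, stats with
  | _, [] => []
  | 0, _ => []
  | f + 1, x :: t =>
    (((PySem.List.enumerate (PySem.List.slice (x :: t) none (some 16)) 0).filter
        (fun p => p.1 ∈ stat_indices)).map Prod.snd)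
      ++ sortAllstatsGo f (PySem.List.slice (x :: t) (some 16) none) stat_indices

def sort_allstats_alt (stats : List Int) (stat_indices : List Int) : List Int :=
  sortAllstatsGo stats.length stats stat_indices

-- ===== PRECONDITION & SPEC =====
def Spec_sort_allstats (stats : List Int) (stat_indices : List Int) (out : List Int) : Prop := out = sort_allstats_alt stats stat_indices
instance (stats : List Int) (stat_indices : List Int) (out : List Int) : Decidable (Spec_sort_allstats stats stat_indices out) := by unfold Spec_sort_allstats; infer_instance

-- ===== CLAIM (what is proved, stated in full; the proofs are below) =====
def Claim_equal_sort_allstats : Prop := ∀ (stats : List Int) (stat_indices : List Int), Dom_sort_allstats stats stat_indices → Spec_sort_allstats stats stat_indices (sort_allstats stats stat_indices)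

-- ===== LEMMAS AND PROOFS =====

-- what A's loop computes starting at counter value c
def selA (stats : List Int) (si : List Int) (c : Int) : List Int :=
  match stats with
  | [] => []
  | i :: t =>
    let c' := if c = 16 then 0 else c
    (if c' ∈ si then [i] else []) ++ selA t si (c' + 1)

-- what B's inner comprehension computes starting at offset c
def selB (chunk : List Int) (si : List Int) (c : Int) : List Int :=
  match chunk with
  | [] => []
  | x :: t => (if c ∈ si then [x] else []) ++ selB t si (c + 1)

theorem foldA (si : List Int) :
    ∀ (stats : List Int) (s0 : List Int) (c : Int),
      (stats.foldl
        (fun (st : List Int × Int) i =>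
          let counter := if st.2 = 16 then 0 else st.2
          ((if counter ∈ si then st.1 ++ [i] else st.1), counter + 1))
        (s0, c)).1 = s0 ++ selA stats si c := by
  intro stats
  induction stats with
  | nil => intro s0 c; simp [selA]
  | cons i t ih =>
    intro s0 c
    simp only [List.foldl_cons, selA]
    rw [ih]
    by_cases h16 : c = 16 <;> by_cases hm : (if c = 16 then (0:Int) else c) ∈ si <;>
      simp [h16] at hm ⊢ <;> simp [hm]

theorem selA_16 (t si : List Int) : selA t si 16 = selA t si 0 := by
  cases t <;> simp [selA]

theorem enumFilter (si : List Int) :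
    ∀ (chunk : List Int) (c : Int),
      ((PySem.List.enumerate chunk c).filter (fun p => p.1 ∈ si)).map Prod.snd
        = selB chunk si c := by
  intro chunk
  induction chunk with
  | nil => intro c; simp [PySem.List.enumerate_nil, selB]
  | cons x t ih =>
    intro c
    by_cases h : c ∈ si <;>
      simp [PySem.List.enumerate_cons, selB, h, ih]

theorem goFuel (si : List Int) :
    ∀ (f : Nat) (stats : List Int) (g : Nat), stats.length ≤ f → stats.length ≤ g →
      sortAllstatsGo f stats si = sortAllstatsGo g stats si := by
  intro f
  induction f with
  | zero =>
    intro stats g hf _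
    have : stats = [] := List.eq_nil_of_length_eq_zero (Nat.le_zero.mp hf)
    subst this; cases g <;> simp [sortAllstatsGo]
  | succ f ih =>
    intro stats g hf hg
    cases stats with
    | nil => cases g <;> simp [sortAllstatsGo]
    | cons x t =>
      cases g with
      | zero => simp at hg
      | succ g =>
        simp only [sortAllstatsGo]
        congr 1
        apply ih <;>
          · simp only [PySem.List.slice_from (x :: t) (by norm_num : (0:Int) ≤ 16),
              List.length_drop, List.length_cons, show Int.toNat 16 = 16 from rfl] at *
            omega

theorem altUnfold (t si : List Int) :
    sort_allstats_alt t si = selB (t.take 16) si 0 ++ sort_allstats_alt (t.drop 16) si := by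
  cases t with
  | nil => simp [sort_allstats_alt, sortAllstatsGo, selB]
  | cons x u =>
    simp only [sort_allstats_alt, List.length_cons, sortAllstatsGo]
    rw [enumFilter]
    have hto : PySem.List.slice (x :: u) none (some 16) = (x :: u).take 16 := by
      rw [PySem.List.slice_to (x :: u) (by norm_num : (0:Int) ≤ 16)]
      rfl
    have hfrom : PySem.List.slice (x :: u) (some 16) none = (x :: u).drop 16 := by
      rw [PySem.List.slice_from (x :: u) (by norm_num : (0:Int) ≤ 16)]
      rfl
    rw [hto, hfrom]
    congr 1
    apply goFuel
    · simp only [List.length_drop, List.length_cons]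
      omega
    · exact le_refl _

theorem selA_chunks (si : List Int) :
    ∀ (stats : List Int) (c : Int), 0 ≤ c → c ≤ 15 →
      selA stats si c
        = selB (stats.take (16 - c).toNat) si c ++ sort_allstats_alt (stats.drop (16 - c).toNat) si := by
  intro stats
  induction stats with
  | nil => intro c _ _; simp [selA, selB, sort_allstats_alt, sortAllstatsGo]
  | cons i t ih =>
    intro c hc0 hc15
    have hc16 : c ≠ 16 := by omega
    have hk : (16 - c).toNat = (15 - c).toNat + 1 := by omega
    simp only [selA, hc16, if_false, hk, List.take_succ_cons, List.drop_succ_cons, selB]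
    rw [List.append_assoc]
    congr 1
    by_cases h15 : c = 15
    · subst h15
      simp only [show ((15:Int) - 15).toNat = 0 from rfl, List.take_zero, List.drop_zero, selB,
        List.nil_append]
      rw [show (15:Int) + 1 = 16 from by norm_num, selA_16, ih 0 (by omega) (by omega),
        altUnfold t si]
      simp
    · have := ih (c + 1) (by omega) (by omega)
      rw [this]
      have : (16 - (c + 1)).toNat = (15 - c).toNat := by omega
      rw [this]

-- ===== VERDICT (by name: the statement is the Claim_ definition above) =====
theorem sort_allstats_spec : Claim_equal_sort_allstats := by
  intro stats si _
  unfold Spec_sort_allstats sort_allstats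
  rw [foldA si stats [] 0, List.nil_append, selA_chunks si stats 0 (by omega) (by omega)]
  simp only [show ((16:Int) - 0).toNat = 16 from rfl]
  rw [← altUnfold]
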